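-- pv_equiv track=rewrite | github.com/leejaeyeong/Algorithm | Programmers/KAKAO/2019_후보키.py | get_attr_combi_unique
-- ===== SOURCE A (Python) =====
-- import itertools
--
-- def get_attr_combi_unique(relation) :
--   unique_list = []
--   for col in range(1,len(relation[0])+1):
--     comb_attributes = itertools.combinations([i for i in range(len(relation[0]))],col) # column 조합 생성
--
--     # all_attr_list = [tuple(item[index] for index in check_comb) for item in relation]
--     for attr_idx in list(comb_attributes):
--       tuples = []
--       for i in relation :
--         row = []
--         for idx in attr_idx :
--           row.append(i[idx])
--         tuples.append(tuple(row)) # set으로 중복 제거를 위해 tuple 자료구조 사용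
--
--       if len(set(tuples)) == len(relation): # 원래 릴레이션의 튜플과 수가 같으면
--         unique_list.append(set(attr_idx))
--   return unique_list
-- ===== SOURCE B (Python) =====
-- import itertools
--
-- def get_attr_combi_unique(relation):
--   # Different algorithm: precompute, for every pair of rows, the bitmask of columns
--   # on which the two rows AGREE.  A column combination is a candidate key iff it is
--   # a subset of no agreement mask, so no projection is ever materialised.
--   m = len(relation[0])
--   n = len(relation)
--   agree = set()
--   for a in range(n):
--     for b in range(a + 1, n):
--       mask = 0
--       for c in range(m):
--         if relation[a][c] == relation[b][c]:
--           mask |= 1 << c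
--       agree.add(mask)
--   unique_list = []
--   for col in range(1, m + 1):
--     for combo in itertools.combinations(range(m), col):
--       cmask = 0
--       for j in combo:
--         cmask |= 1 << j
--       if all(cmask | g != g for g in agree):
--         unique_list.append(set(combo))
--   return unique_list
-- ===== Notes on version B (the rewrite author's own statement) =====
-- stated objective: alternative
-- what changed: B never builds per-combination projections: it precomputes, for every pair of rows, the bitmask of columns on which they agree, and accepts a combination iff its bitmask is a subset of no agreement mask, replacing A's projection + set-size uniqueness test.
-- outside the precondition, e.g. on get_attr_combi_unique([]): A raises IndexError, B raises IndexError; on get_attr_combi_unique([['a', 'b'], ['c']]): A raises IndexError, B raises IndexError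
import Mathlib
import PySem

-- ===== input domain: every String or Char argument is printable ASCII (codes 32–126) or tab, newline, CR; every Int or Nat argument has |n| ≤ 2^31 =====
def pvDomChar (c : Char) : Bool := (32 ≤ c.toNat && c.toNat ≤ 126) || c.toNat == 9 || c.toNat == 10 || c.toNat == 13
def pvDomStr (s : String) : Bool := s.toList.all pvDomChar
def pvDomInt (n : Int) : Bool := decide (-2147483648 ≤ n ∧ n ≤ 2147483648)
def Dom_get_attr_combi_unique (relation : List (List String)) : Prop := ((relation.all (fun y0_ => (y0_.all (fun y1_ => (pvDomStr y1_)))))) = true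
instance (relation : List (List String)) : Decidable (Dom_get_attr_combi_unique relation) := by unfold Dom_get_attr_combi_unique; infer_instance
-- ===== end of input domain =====

-- B replaces A's per-combination projection + set-size uniqueness test by precomputed
-- pairwise row-agreement bitmasks and a subset test per combination (alternative algorithm).

-- itertools.combinations of a list, size k, in itertools' lexicographic order (used by both Pythons)
def pvCombos : List Int → Nat → List (List Int)
  | _, 0 => [[]]
  | [], _ + 1 => []
  | x :: xs, k + 1 => (pvCombos xs k).map (x :: ·) ++ pvCombos xs (k + 1)

-- ===== PORT A =====
def get_attr_combi_unique (relation : List (List String)) : List (List Int) :=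
  (PySem.List.pyRange 1 ((((PySem.List.pyGet? relation 0).getD []).length : Int) + 1) 1).foldl (fun ul col =>
    (pvCombos ((List.range ((PySem.List.pyGet? relation 0).getD []).length).map (fun (i : Nat) => (i : Int)))
        col.toNat).foldl (fun ul attr_idx =>
      if (PySem.Set.ofList (relation.foldl (fun ts i =>
            ts ++ [attr_idx.foldl (fun row idx => row ++ [(PySem.List.pyGet? i idx).getD ""]) []]) [])).length
          = relation.length
      then ul ++ [PySem.Set.ofList attr_idx] else ul) ul) []

-- ===== PORT B =====
-- mask of the columns c < m on which rows ra and rb agree (Source B's inner 'for c in range(m)';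
-- row indices in Source B are always in range, so relation[a][c] is ported as getD)
def pvAgreeMask (ra rb : List String) (m : Nat) : Nat :=
  (List.range m).foldl (fun mask c =>
    if ra.getD c "" = rb.getD c "" then mask ||| (1 <<< c) else mask) 0

-- the set 'agree' of Source B: agreement masks of all row pairs a < b
def pvAgree (relation : List (List String)) (m : Nat) : PySem.Set Nat :=
  (List.range relation.length).foldl (fun s a =>
    (List.range' (a + 1) (relation.length - (a + 1))).foldl (fun s b =>
      PySem.Set.add s (pvAgreeMask (relation.getD a []) (relation.getD b []) m)) s)
    PySem.Set.empty

-- cmask of Source B: the bitmask of a column combination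
def pvCMask (combo : List Int) : Nat :=
  combo.foldl (fun cm j => cm ||| (1 <<< j.toNat)) 0

def get_attr_combi_unique_alt (relation : List (List String)) : List (List Int) :=
  let m := ((PySem.List.pyGet? relation 0).getD []).length
  let agree := pvAgree relation m
  (PySem.List.pyRange 1 ((m : Int) + 1) 1).foldl (fun ul col =>
    (pvCombos ((List.range m).map (fun (i : Nat) => (i : Int))) col.toNat).foldl (fun ul combo =>
      if agree.all (fun g => (pvCMask combo ||| g) != g)
      then ul ++ [PySem.Set.ofList combo] else ul) ul) []

-- ===== PRECONDITION & SPEC =====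
-- Pre_ excludes exactly the inputs where both Pythons raise IndexError: the empty relation
-- (relation[0]) and relations with a row shorter than the first row (row[idx] / relation[b][c]).
def Pre_get_attr_combi_unique (relation : List (List String)) : Prop :=
  relation ≠ [] ∧ ∀ r ∈ relation, (relation.headD []).length ≤ r.length
instance (relation : List (List String)) : Decidable (Pre_get_attr_combi_unique relation) := by
  unfold Pre_get_attr_combi_unique; infer_instance
def pvWitness_get_attr_combi_unique : List (List String) := [["a", "b"], ["c", "d"]]

def Spec_get_attr_combi_unique (relation : List (List String)) (out : List (List Int)) : Prop := out = get_attr_combi_unique_alt relation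
instance (relation : List (List String)) (out : List (List Int)) : Decidable (Spec_get_attr_combi_unique relation out) := by unfold Spec_get_attr_combi_unique; infer_instance

-- ===== CLAIM (what is proved, stated in full; the proofs are below) =====
def Claim_equal_get_attr_combi_unique : Prop := ∀ (relation : List (List String)), Dom_get_attr_combi_unique relation → Pre_get_attr_combi_unique relation → Spec_get_attr_combi_unique relation (get_attr_combi_unique relation)

-- ===== LEMMAS AND PROOFS =====

theorem foldl_snoc_map {α β : Type} (f : α → β) :
    ∀ (l : List α) (acc : List β), l.foldl (fun ts i => ts ++ [f i]) acc = acc ++ l.map f := by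
  intro l
  induction l with
  | nil => simp
  | cons a l ih => intro acc; simp [List.foldl_cons, ih]

theorem pvCombos_subset :
    ∀ (l : List Int) (k : Nat) (c : List Int), c ∈ pvCombos l k → ∀ x ∈ c, x ∈ l := by
  intro l
  induction l with
  | nil =>
    intro k c hc x hx
    cases k with
    | zero => simp [pvCombos] at hc; subst hc; simp at hx
    | succ k => simp [pvCombos] at hc
  | cons a l ih =>
    intro k c hc x hx
    cases k with
    | zero => simp [pvCombos] at hc; subst hc; simp at hx
    | succ k =>
      simp only [pvCombos, List.mem_append, List.mem_map] at hc
      rcases hc with ⟨c', hc', rfl⟩ | hc'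
      · rcases List.mem_cons.mp hx with rfl | hx'
        · exact List.mem_cons_self
        · exact List.mem_cons_of_mem _ (ih k c' hc' x hx')
      · exact List.mem_cons_of_mem _ (ih (k + 1) c hc' x hx)

-- set(l) keeps the length of l exactly when l has no duplicates
theorem ofList_sublist {α : Type} [BEq α] [LawfulBEq α] :
    ∀ (l : List α), (PySem.Set.ofList l).Sublist l := by
  intro l
  induction l with
  | nil => simp [PySem.Set.ofList_nil]
  | cons x xs ih =>
    rw [PySem.Set.ofList_cons]
    refine List.Sublist.cons₂ x ?_
    have h1 : (PySem.Set.discard (PySem.Set.ofList xs) x).Sublist (PySem.Set.ofList xs) := by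
      simp only [PySem.Set.discard]
      exact List.filter_sublist
    exact h1.trans ih

theorem set_len_iff_nodup {α : Type} [BEq α] [LawfulBEq α] (l : List α) :
    (PySem.Set.ofList l).length = l.length ↔ l.Nodup := by
  constructor
  · intro h
    have := (ofList_sublist l).eq_of_length h
    rw [← this]
    exact PySem.Set.nodup_ofList l
  · intro h
    rw [PySem.Set.ofList_eq_self_of_nodup l h]

-- bits of the pairwise agreement mask
theorem testBit_one_shift (m i : Nat) : ((1 <<< m : Nat)).testBit i = decide (i = m) := by
  have h1 : (1 <<< m : Nat) = 2 ^ m := by rw [Nat.shiftLeft_eq, one_mul]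
  rw [h1, Nat.testBit_two_pow]
  simp [eq_comm]

theorem agreeMask_testBit (ra rb : List String) :
    ∀ (m i : Nat), (pvAgreeMask ra rb m).testBit i
      = (decide (i < m) && decide (ra.getD i "" = rb.getD i "")) := by
  intro m
  induction m with
  | zero => intro i; simp [pvAgreeMask]
  | succ m ih =>
    intro i
    have hstep : pvAgreeMask ra rb (m + 1)
        = (if ra.getD m "" = rb.getD m "" then pvAgreeMask ra rb m ||| (1 <<< m) else pvAgreeMask ra rb m) := by
      simp [pvAgreeMask, List.range_succ]
    rw [hstep]
    by_cases heq : ra.getD m "" = rb.getD m ""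
    · rw [if_pos heq, Nat.testBit_or, ih i, testBit_one_shift]
      by_cases hi : i = m
      · subst hi
        rw [decide_eq_true heq]
        simp
      · rw [decide_eq_false hi]
        rw [show decide (i < m) = decide (i < m + 1) from decide_eq_decide.mpr (by omega)]
        simp
    · rw [if_neg heq, ih i]
      by_cases hi : i = m
      · subst hi
        rw [decide_eq_false heq]
        simp
      · rw [show decide (i < m) = decide (i < m + 1) from decide_eq_decide.mpr (by omega)]

-- bits of the combination mask
theorem cmask_foldl_testBit :
    ∀ (l : List Int) (acc : Nat) (i : Nat),
      (l.foldl (fun cm j => cm ||| (1 <<< j.toNat)) acc).testBit i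
        = (acc.testBit i || l.any (fun j => j.toNat == i)) := by
  intro l
  induction l with
  | nil => intro acc i; simp
  | cons x xs ih =>
    intro acc i
    rw [List.foldl_cons, ih, Nat.testBit_or, testBit_one_shift]
    simp [List.any_cons]
    by_cases h : x.toNat = i
    · simp [h]
    · cases hB : (x.toNat == i) with
      | false => simp [show ¬ i = x.toNat from fun hh => h hh.symm]
      | true => exact absurd (eq_of_beq hB) h

theorem cmask_testBit (combo : List Int) (i : Nat) :
    (pvCMask combo).testBit i = combo.any (fun j => j.toNat == i) := by
  rw [pvCMask, cmask_foldl_testBit]; simp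

-- x | g == g  ↔  every bit of x is a bit of g
theorem or_eq_right_iff (x g : Nat) : x ||| g = g ↔ ∀ i, x.testBit i = true → g.testBit i = true := by
  constructor
  · intro h i hi
    have := congrArg (fun z => z.testBit i) h
    simp only [Nat.testBit_or, hi, Bool.true_or] at this
    exact this.symm
  · intro h
    apply Nat.eq_of_testBit_eq
    intro i
    rw [Nat.testBit_or]
    cases hx : x.testBit i
    · simp
    · simp [h i hx]

-- membership in the doubly-nested set-building fold of pvAgree
theorem mem_double_foldl_add {α β γ : Type} [BEq γ] [LawfulBEq γ]
    (g : α → List β) (f : α → β → γ) (y : γ) :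
    ∀ (l : List α) (s0 : PySem.Set γ),
      (y ∈ l.foldl (fun s a => (g a).foldl (fun s b => PySem.Set.add s (f a b)) s) s0)
        ↔ (y ∈ s0 ∨ ∃ a ∈ l, ∃ b ∈ g a, y = f a b) := by
  intro l
  induction l with
  | nil => intro s0; simp
  | cons x xs ih =>
    intro s0
    rw [List.foldl_cons, ih, PySem.Set.mem_foldl_add]
    constructor
    · rintro (⟨h | ⟨b, hb, rfl⟩⟩ | ⟨a, ha, b, hb, rfl⟩)
      · exact Or.inl h
      · exact Or.inr ⟨x, List.mem_cons_self, b, hb, rfl⟩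
      · exact Or.inr ⟨a, List.mem_cons_of_mem _ ha, b, hb, rfl⟩
    · rintro (h | ⟨a, ha, b, hb, rfl⟩)
      · exact Or.inl (Or.inl h)
      · rcases List.mem_cons.mp ha with rfl | ha'
        · exact Or.inl (Or.inr ⟨b, hb, rfl⟩)
        · exact Or.inr ⟨a, ha', b, hb, rfl⟩

theorem mem_pvAgree (relation : List (List String)) (m : Nat) (y : Nat) :
    y ∈ pvAgree relation m
      ↔ ∃ a b, a < b ∧ b < relation.length
          ∧ y = pvAgreeMask (relation.getD a []) (relation.getD b []) m := by
  rw [pvAgree, mem_double_foldl_add (g := fun a => List.range' (a + 1) (relation.length - (a + 1)))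
        (f := fun a b => pvAgreeMask (relation.getD a []) (relation.getD b []) m)]
  simp only [PySem.Set.empty, List.not_mem_nil, false_or, List.mem_range, List.mem_range'_1]
  constructor
  · rintro ⟨a, ha, b, ⟨hb1, hb2⟩, rfl⟩
    exact ⟨a, b, by omega, by omega, rfl⟩
  · rintro ⟨a, b, hab, hbn, rfl⟩
    exact ⟨a, by omega, b, ⟨by omega, by omega⟩, rfl⟩

-- the per-combination condition of A equals the per-combination condition of B
theorem cond_iff (r0 : List String) (rest : List (List String))
    (hlen : ∀ r ∈ r0 :: rest, r0.length ≤ r.length)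
    (combo : List Int)
    (hsub : ∀ x ∈ combo, x ∈ (List.range r0.length).map (fun (i : Nat) => (i : Int))) :
    ((PySem.Set.ofList ((r0 :: rest).foldl (fun ts i =>
        ts ++ [combo.foldl (fun row idx => row ++ [(PySem.List.pyGet? i idx).getD ""]) []]) [])).length
      = (r0 :: rest).length)
    ↔ ((pvAgree (r0 :: rest) r0.length).all
        (fun g => (pvCMask combo ||| g) != g) = true) := by
  set relation := r0 :: rest with hrel
  have hmem : ∀ x ∈ combo, 0 ≤ x ∧ x.toNat < r0.length := by
    intro x hx
    rcases List.mem_map.mp (hsub x hx) with ⟨jn, hjn, rfl⟩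
    exact ⟨Int.natCast_nonneg jn, by simpa using List.mem_range.mp hjn⟩
  -- per-row projection as a map
  have hrowmap : ∀ r ∈ relation,
      combo.foldl (fun row idx => row ++ [(PySem.List.pyGet? r idx).getD ""]) []
      = combo.map (fun idx => r.getD idx.toNat "") := by
    intro r hr
    rw [foldl_snoc_map]
    simp only [List.nil_append]
    apply List.map_congr_left
    intro idx hidx
    rcases List.mem_map.mp (hsub idx hidx) with ⟨jn, hjn, rfl⟩
    have hjm : jn < r0.length := List.mem_range.mp hjn
    have hjr : jn < r.length := lt_of_lt_of_le hjm (hlen r hr)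
    rw [show PySem.List.pyGet? r (jn : Int) = r[jn]? from PySem.List.pyGet?_natCast _ _]
    simp [List.getD_eq_getElem?_getD, List.getElem?_eq_getElem hjr]
  have htuples : (relation.foldl (fun ts i =>
      ts ++ [combo.foldl (fun row idx => row ++ [(PySem.List.pyGet? i idx).getD ""]) []]) [])
      = relation.map (fun r => combo.map (fun idx => r.getD idx.toNat "")) := by
    rw [foldl_snoc_map]
    simp only [List.nil_append]
    exact List.map_congr_left hrowmap
  rw [htuples]
  -- LHS ↔ pairwise distinctness of the projected rows
  rw [show relation.length = (relation.map (fun r => combo.map (fun idx => r.getD idx.toNat ""))).length from by simp]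
  rw [set_len_iff_nodup, List.Nodup, List.pairwise_iff_getElem]
  -- RHS ↔ per-pair subset failure
  rw [List.all_eq_true]
  constructor
  · -- Nodup → all masks fail the subset test
    intro h g hg
    rcases (mem_pvAgree relation r0.length g).mp hg with ⟨a, b, hab, hbn, rfl⟩
    have han : a < relation.length := lt_trans hab hbn
    have hne := h a b (by simpa using han) (by simpa using hbn) hab
    simp only [List.getElem_map] at hne
    have hdiff : ∃ j ∈ combo, relation[a].getD j.toNat "" ≠ relation[b].getD j.toNat "" := by
      by_contra hall
      apply hne
      apply List.map_congr_left
      intro j hj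
      by_contra hne2
      exact hall ⟨j, hj, hne2⟩
    rcases hdiff with ⟨j, hj, hjne⟩
    have hga : relation.getD a [] = relation[a] := by
      simp [List.getD_eq_getElem?_getD, List.getElem?_eq_getElem han]
    have hgb : relation.getD b [] = relation[b] := by
      simp [List.getD_eq_getElem?_getD, List.getElem?_eq_getElem hbn]
    rw [bne_iff_ne]
    intro horg
    have hbits := (or_eq_right_iff _ _).mp horg
    have hcb : (pvCMask combo).testBit j.toNat = true := by
      rw [cmask_testBit, List.any_eq_true]
      exact ⟨j, hj, by simp⟩
    have := hbits j.toNat hcb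
    rw [agreeMask_testBit, hga, hgb] at this
    simp only [Bool.and_eq_true, decide_eq_true_eq] at this
    exact hjne this.2
  · -- all masks fail the subset test → Nodup
    intro h a b ha hb hab
    simp only [List.length_map] at ha hb
    simp only [List.getElem_map]
    intro heq
    have hg : pvAgreeMask (relation.getD a []) (relation.getD b []) r0.length ∈ pvAgree relation r0.length :=
      (mem_pvAgree relation r0.length _).mpr ⟨a, b, hab, hb, rfl⟩
    have := h _ hg
    rw [bne_iff_ne] at this
    apply this
    apply (or_eq_right_iff _ _).mpr
    intro i hi
    rw [cmask_testBit, List.any_eq_true] at hi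
    rcases hi with ⟨j, hj, hji⟩
    have hji' : j.toNat = i := by simpa using hji
    rcases hmem j hj with ⟨_, hjm⟩
    have hga : relation.getD a [] = relation[a] := by
      simp [List.getD_eq_getElem?_getD, List.getElem?_eq_getElem ha]
    have hgb : relation.getD b [] = relation[b] := by
      simp [List.getD_eq_getElem?_getD, List.getElem?_eq_getElem hb]
    rw [agreeMask_testBit, hga, hgb]
    have heqj : relation[a].getD j.toNat "" = relation[b].getD j.toNat "" := by
      have := congrArg (fun l => l.getD (combo.idxOf j) "") heq
      -- extract the j-component from equality of the projected rows
      have hidx : combo.idxOf j < combo.length := List.idxOf_lt_length_of_mem hj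
      simp only [List.getD_eq_getElem?_getD, List.getElem?_map] at this
      rw [List.getElem?_eq_getElem hidx] at this
      simp only [Option.map_some, Option.getD_some, List.getElem_idxOf] at this
      exact this
    rw [← hji', heqj]
    simp [hjm]

-- ===== VERDICT (by name: the statement is the Claim_ definition above) =====
theorem get_attr_combi_unique_spec : Claim_equal_get_attr_combi_unique := by
  intro relation _ hPre
  obtain ⟨hne, hlen⟩ := hPre
  rcases relation with _ | ⟨r0, rest⟩
  · exact absurd rfl hne
  simp only [List.headD_cons] at hlen
  unfold Spec_get_attr_combi_unique get_attr_combi_unique get_attr_combi_unique_alt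
  have hget0 : (PySem.List.pyGet? (r0 :: rest) 0).getD [] = r0 := by
    rw [PySem.List.pyGet?_zero_cons]; rfl
  rw [hget0]
  apply PySem.List.foldl_congr_mem
  intro acc col _
  apply PySem.List.foldl_congr_mem
  intro acc2 combo hcombo
  have hsub : ∀ x ∈ combo, x ∈ (List.range r0.length).map (fun (i : Nat) => (i : Int)) :=
    pvCombos_subset _ _ _ hcombo
  exact if_congr (cond_iff r0 rest hlen combo hsub) rfl rfl
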